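-- pv_equiv track=rewrite | github.com/chunkit46/Python | 20221208_mastery_exam_2/Q3.py | reverse_lower
-- ===== SOURCE A (Python) =====
-- def reverse_lower(s: str) -> str:
--     lower = [c for c in s if c.islower()]
--     other = [c for c in s if not c.islower()]
--
--     lower = lower[::-1]
--
--     result = []
--     for c in s:
--         if c.islower():
--             result.append(lower.pop(0))
--         else:
--             result.append(c)
--
--     return "".join(result)
-- ===== SOURCE B (Python) =====
-- def reverse_lower(s: str) -> str:
--     cs = list(s)
--     i, j = 0, len(cs) - 1
--     while i < j:
--         if not cs[i].islower():
--             i += 1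
--         elif not cs[j].islower():
--             j -= 1
--         else:
--             cs[i], cs[j] = cs[j], cs[i]
--             i += 1
--             j -= 1
--     return "".join(cs)
-- ===== Notes on version B (the rewrite author's own statement) =====
-- stated objective: faster
-- what changed: B reverses the lowercase letters by swapping pairs in place with two pointers moving inward over a char list, instead of A's extract-filter, slice-reverse and reinsert via repeated quadratic pop(0).
import Mathlib
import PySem

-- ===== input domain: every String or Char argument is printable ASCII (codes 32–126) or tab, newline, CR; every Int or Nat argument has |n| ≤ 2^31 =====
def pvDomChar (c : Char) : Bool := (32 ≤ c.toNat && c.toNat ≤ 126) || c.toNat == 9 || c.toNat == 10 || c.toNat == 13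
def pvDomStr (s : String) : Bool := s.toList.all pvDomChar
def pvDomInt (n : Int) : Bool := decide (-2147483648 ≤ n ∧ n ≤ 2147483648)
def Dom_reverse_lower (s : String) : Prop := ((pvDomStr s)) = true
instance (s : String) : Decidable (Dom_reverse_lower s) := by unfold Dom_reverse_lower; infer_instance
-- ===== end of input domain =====

-- B reverses the lowercase letters by swapping them in place with two pointers moving
-- inward (one O(n) pass), instead of A's extract-reverse-reinsert with repeated O(n) pop(0); objective: faster.

-- ===== PORT A =====
-- one step of A's "for c in s" loop; state = (remaining reversed lowercase list, result so far)
def stepA (st : List Char × List Char) (c : Char) : List Char × List Char :=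
  if PySem.Chars.islower c then
    match PySem.List.pop? st.1 0 with
    | some (x, rest) => (rest, st.2 ++ [x])
    | none => (st.1, st.2 ++ [c])  -- unreachable: Python would raise IndexError here, but the pops never outrun the lowercase list
  else (st.1, st.2 ++ [c])

def reverse_lower (s : String) : String :=
  let lower := s.toList.filter (fun c => PySem.Chars.islower c)
  let _other := s.toList.filter (fun c => !(PySem.Chars.islower c))
  let lower := (PySem.List.slice? lower none none (-1)).getD []   -- lower[::-1]
  let r := s.toList.foldl stepA (lower, [])
  String.mk r.2

-- ===== PORT B =====
-- the while loop of Source B; cs[i]/cs[j] are always in range when read (0 ≤ i < j < len),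
-- so Nat indices with getD are exact (j = len-1 underflows only when the loop never runs)
def bloopB (cs : List Char) (i j : Nat) : List Char :=
  if _h : i < j then
    if !(PySem.Chars.islower (cs.getD i ' ')) then bloopB cs (i + 1) j
    else if !(PySem.Chars.islower (cs.getD j ' ')) then bloopB cs i (j - 1)
    else bloopB ((cs.set i (cs.getD j ' ')).set j (cs.getD i ' ')) (i + 1) (j - 1)
  else cs
termination_by j - i
decreasing_by all_goals omega

def reverse_lower_alt (s : String) : String :=
  String.mk (bloopB s.toList 0 (s.toList.length - 1))

-- ===== PRECONDITION & SPEC =====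
def Spec_reverse_lower (s : String) (out : String) : Prop := out = reverse_lower_alt s
instance (s : String) (out : String) : Decidable (Spec_reverse_lower s out) := by unfold Spec_reverse_lower; infer_instance

-- ===== CLAIM (what is proved, stated in full; the proofs are below) =====
def Claim_equal_reverse_lower : Prop := ∀ (s : String), Dom_reverse_lower s → Spec_reverse_lower s (reverse_lower s)

-- ===== LEMMAS AND PROOFS =====

-- common specification: weave the chars of the string with a supply of replacement lowercase letters
def weave : List Char → List Char → List Char
  | [], _ => []
  | c :: cs, ls =>
    if PySem.Chars.islower c then
      match ls with
      | [] => c :: weave cs []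
      | x :: xs => x :: weave cs xs
    else c :: weave cs ls

def tspec (l : List Char) : List Char :=
  weave l ((l.filter (fun c => PySem.Chars.islower c)).reverse)

lemma weave_append (a b ls : List Char) :
    weave (a ++ b) ls = weave a ls ++ weave b (ls.drop (a.countP (fun c => PySem.Chars.islower c))) := by
  induction a generalizing ls with
  | nil => simp [weave]
  | cons c a ih =>
    by_cases hc : PySem.Chars.islower c
    · cases ls with
      | nil => simp [weave, hc, ih]
      | cons x xs => simp [weave, hc, ih]
    · simp [weave, hc, ih]

lemma weave_extra (m ls t : List Char)
    (h : m.countP (fun c => PySem.Chars.islower c) ≤ ls.length) :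
    weave m (ls ++ t) = weave m ls := by
  induction m generalizing ls with
  | nil => simp [weave]
  | cons c m ih =>
    by_cases hc : PySem.Chars.islower c
    · cases ls with
      | nil => simp [hc] at h
      | cons x xs =>
        simp [hc] at h
        simp [weave, hc, ih xs (by omega)]
    · simp [hc] at h
      simp [weave, hc, ih ls h]

lemma tspec_single (c : Char) : tspec [c] = [c] := by
  by_cases hc : PySem.Chars.islower c <;> simp [tspec, weave, hc]

lemma tspec_cons_not (x : Char) (m : List Char) (hx : ¬ PySem.Chars.islower x) :
    tspec (x :: m) = x :: tspec m := by
  simp [tspec, weave, hx]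

lemma tspec_concat_not (m : List Char) (y : Char) (hy : ¬ PySem.Chars.islower y) :
    tspec (m ++ [y]) = tspec m ++ [y] := by
  simp only [tspec, List.filter_append, List.filter_cons, hy]
  simp only [Bool.false_eq_true, if_false, List.filter_nil, List.append_nil, weave_append]
  simp [weave, hy]

lemma tspec_both (x : Char) (m : List Char) (y : Char)
    (hx : PySem.Chars.islower x) (hy : PySem.Chars.islower y) :
    tspec (x :: m ++ [y]) = y :: tspec m ++ [x] := by
  have hcnt : m.countP (fun c => PySem.Chars.islower c)
      = (m.filter (fun c => PySem.Chars.islower c)).reverse.length := by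
    simp [List.countP_eq_length_filter]
  simp only [tspec, List.cons_append, List.filter_cons, hx, if_true, List.filter_append,
    List.filter_cons, hy, List.filter_nil, List.reverse_cons, List.reverse_append]
  simp only [weave, hx, List.reverse_nil, List.nil_append, List.cons_append,
    List.nil_append]
  rw [weave_append]
  rw [show ((m.filter (fun c => PySem.Chars.islower c)).reverse ++ [x]).drop
        (m.countP (fun c => PySem.Chars.islower c)) = [x] by rw [hcnt]; simp]
  rw [weave_extra m _ [x] (le_of_eq (by rw [hcnt]))]
  simp [weave, hy]

lemma getD_append_length (pre t : List Char) (c d : Char) :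
    (pre ++ c :: t).getD pre.length d = c := by
  induction pre with
  | nil => rfl
  | cons p ps ih => simp [ih]

lemma set_append_length (pre t : List Char) (c v : Char) :
    (pre ++ c :: t).set pre.length v = pre ++ v :: t := by
  induction pre with
  | nil => rfl
  | cons p ps ih => simp [ih]

lemma bloopB_spec (n : Nat) : ∀ (mid pre post : List Char), mid.length = n →
    bloopB (pre ++ mid ++ post) pre.length (pre.length + mid.length - 1)
      = pre ++ tspec mid ++ post := by
  induction n using Nat.strong_induction_on with
  | _ n IH =>
    intro mid pre post hlen
    match mid, hlen with
    | [], _ =>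
      rw [bloopB]; simp [tspec, weave]
    | [c], _ =>
      rw [bloopB]; simp [tspec_single]
    | (x :: rest), hlen =>
      rcases eq_or_ne rest [] with hr | hr
      · subst hr; rw [bloopB]; simp [tspec_single]
      · obtain ⟨m, y, hm⟩ : ∃ m y, rest = m ++ [y] := ⟨rest.dropLast, rest.getLast hr, (List.dropLast_append_getLast hr).symm⟩
        subst hm
        have hL : pre ++ (x :: (m ++ [y])) ++ post = pre ++ x :: (m ++ y :: post) := by simp
        have hgi : (pre ++ x :: (m ++ y :: post)).getD pre.length ' ' = x :=
          getD_append_length pre _ x ' '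
        have hj : pre.length + (x :: (m ++ [y])).length - 1 = pre.length + m.length + 1 := by
          simp; omega
        have hgj : (pre ++ x :: (m ++ y :: post)).getD (pre.length + m.length + 1) ' ' = y := by
          have h2 : pre ++ x :: (m ++ y :: post) = (pre ++ x :: m) ++ y :: post := by simp
          have h3 : (pre ++ x :: m).length = pre.length + m.length + 1 := by simp; omega
          rw [h2, ← h3, getD_append_length]
        rw [hL, hj, bloopB]
        have hij : pre.length < pre.length + m.length + 1 := by omega
        rw [dif_pos hij, hgi, hgj]
        by_cases hx : PySem.Chars.islower x
        · by_cases hy : PySem.Chars.islower y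
          · -- swap case
            rw [if_neg (by simp [hx]), if_neg (by simp [hy])]
            have hset : ((pre ++ x :: (m ++ y :: post)).set pre.length y).set
                (pre.length + m.length + 1) x = (pre ++ [y]) ++ m ++ (x :: post) := by
              rw [set_append_length pre _ x y,
                show pre ++ y :: (m ++ y :: post) = (pre ++ y :: m) ++ y :: post by simp,
                show pre.length + m.length + 1 = (pre ++ y :: m).length by
                  simp only [List.length_append, List.length_cons]; omega,
                set_append_length]
              simp
            have h6 : pre.length + m.length + 1 - 1 = (pre ++ [y]).length + m.length - 1 := by
              simp only [List.length_append, List.length_cons, List.length_nil]; omega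
            have h5 : pre.length + 1 = (pre ++ [y]).length := by simp
            rw [hset, h6, h5, IH m.length (by simp only [List.length_cons, List.length_append, List.length_nil] at hlen; omega) m (pre ++ [y]) (x :: post) rfl]
            rw [show tspec (x :: (m ++ [y])) = y :: tspec m ++ [x] from tspec_both x m y hx hy]
            simp
          · -- y not lowercase: shrink from the right
            rw [if_neg (by simp [hx]), if_pos (by simp [hy])]
            have h4 : pre ++ x :: (m ++ y :: post) = pre ++ (x :: m) ++ (y :: post) := by simp
            have h6 : pre.length + m.length + 1 - 1 = pre.length + (x :: m).length - 1 := by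
              simp only [List.length_cons]; omega
            rw [h4, h6, IH (x :: m).length (by simp only [List.length_cons, List.length_append, List.length_nil] at hlen ⊢; omega) (x :: m) pre (y :: post) rfl]
            rw [show tspec (x :: (m ++ [y])) = tspec (x :: m) ++ [y] from tspec_concat_not (x :: m) y hy]
            simp
        · -- x not lowercase: shrink from the left
          rw [if_pos (by simp [hx])]
          have h4 : pre ++ x :: (m ++ y :: post) = (pre ++ [x]) ++ (m ++ [y]) ++ post := by simp
          have h5 : pre.length + 1 = (pre ++ [x]).length := by simp
          have h6 : pre.length + m.length + 1 = (pre ++ [x]).length + (m ++ [y]).length - 1 := by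
            simp only [List.length_append, List.length_cons, List.length_nil]; omega
          rw [h4, h6, h5, IH (m ++ [y]).length (by simp only [List.length_cons, List.length_append, List.length_nil] at hlen ⊢; omega) (m ++ [y]) (pre ++ [x]) post rfl]
          rw [show tspec (x :: (m ++ [y])) = x :: tspec (m ++ [y]) from tspec_cons_not x _ hx]
          simp

lemma foldl_stepA (cs : List Char) : ∀ (ls acc : List Char),
    (cs.foldl stepA (ls, acc)).2 = acc ++ weave cs ls := by
  induction cs with
  | nil => intro ls acc; simp [weave]
  | cons c cs ih =>
    intro ls acc
    by_cases hc : PySem.Chars.islower c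
    · cases ls with
      | nil => simp [stepA, hc, weave, PySem.List.pop?, ih]
      | cons x xs => simp [stepA, hc, weave, ih]
    · simp [stepA, hc, weave, ih]

lemma reverse_lower_eq_tspec (s : String) : reverse_lower s = String.mk (tspec s.toList) := by
  unfold reverse_lower
  simp only [PySem.List.slice?_none_none_neg_one, Option.getD_some]
  rw [foldl_stepA]
  simp [tspec]

lemma reverse_lower_alt_eq_tspec (s : String) : reverse_lower_alt s = String.mk (tspec s.toList) := by
  unfold reverse_lower_alt
  have h := bloopB_spec s.toList.length s.toList [] [] rfl
  simp only [List.append_nil, List.nil_append, List.length_nil, Nat.zero_add] at h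
  rw [h]

-- ===== VERDICT (by name: the statement is the Claim_ definition above) =====
theorem reverse_lower_spec : Claim_equal_reverse_lower := by
  intro s _
  unfold Spec_reverse_lower
  rw [reverse_lower_eq_tspec, reverse_lower_alt_eq_tspec]
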